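-- pv_equiv track=rewrite | github.com/Rocky-Zhenxiang-Fang/LeetCode | 71. Simplify Path.py | _get_next_directory
-- ===== SOURCE A (Python) =====
-- from typing import Tuple
--
-- def _get_next_directory(path: str, start: int) -> Tuple[str, int]:
--     """
--     Given a path and a start, return the next directory and the next start
--     """
--     res = []
--     while start < len(path):
--         if path[start] != "/":
--             res.append(path[start])
--         else:
--             if res:
--                 break
--         start += 1
--     return "".join(res).strip(), start
-- ===== SOURCE B (Python) =====
-- def _get_next_directory(path, start):
--     n = len(path)
--     if start >= n:
--         return "", start
--     i = start
--     while i < n and path[i] == "/":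
--         i += 1
--     slash = path.find("/", i)
--     end = slash if slash != -1 else n
--     return path[i:end].strip(), end
-- ===== Notes on version B (the rewrite author's own statement) =====
-- stated objective: idiomatic
-- what changed: A collects the segment character by character into a Python list inside one while loop with break logic; B first skips leading slashes, then locates the segment end with str.find and returns one stripped slice.
-- outside the precondition, e.g. on _get_next_directory('ab', -1): A returns ('bab', 2), B returns ('b', 2)
import Mathlib
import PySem

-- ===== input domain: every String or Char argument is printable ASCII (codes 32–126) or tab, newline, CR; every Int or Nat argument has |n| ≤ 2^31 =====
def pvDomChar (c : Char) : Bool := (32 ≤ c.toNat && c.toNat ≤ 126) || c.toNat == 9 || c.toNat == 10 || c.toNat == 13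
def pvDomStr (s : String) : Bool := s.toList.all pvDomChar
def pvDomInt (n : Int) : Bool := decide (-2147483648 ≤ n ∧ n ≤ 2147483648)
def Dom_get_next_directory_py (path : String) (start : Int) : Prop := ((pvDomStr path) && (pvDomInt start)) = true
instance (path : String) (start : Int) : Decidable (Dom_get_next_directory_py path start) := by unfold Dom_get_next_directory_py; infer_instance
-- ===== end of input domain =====

-- B replaces A's char-by-char collecting while-loop by skip-leading-slashes + str.find + one slice (idiomatic; a timing run measured it faster by a constant factor).

-- ===== PORT A =====
-- A's while loop: res is the growing list of collected characters, start the cursor.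
def pvALoop (cs : List Char) (res : List Char) (start : Int) : List Char × Int :=
  if _h : start < (cs.length : Int) then
    match PySem.List.pyGet? cs start with
    | none => (res, start)  -- Python raises IndexError here (start < -len); excluded by Pre_
    | some c =>
      if c ≠ '/' then pvALoop cs (res ++ [c]) (start + 1)
      else if res ≠ [] then (res, start)
      else pvALoop cs res (start + 1)
  else (res, start)
termination_by ((cs.length : Int) - start).toNat
decreasing_by all_goals omega

def get_next_directory_py (path : String) (start : Int) : String × Int :=
  let r := pvALoop path.toList [] start
  (PySem.Str.strip (String.mk r.1), r.2)

-- ===== PORT B =====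
-- B's 'while i < n and path[i] == "/"' skip loop.
def pvBSkip (cs : List Char) (i : Int) : Int :=
  if _h : i < (cs.length : Int) then
    match PySem.List.pyGet? cs i with
    | some c => if c = '/' then pvBSkip cs (i + 1) else i
    | none => i  -- Python raises IndexError here (i < -len); excluded by Pre_
  else i
termination_by ((cs.length : Int) - i).toNat
decreasing_by all_goals omega

def get_next_directory_py_alt (path : String) (start : Int) : String × Int :=
  if start ≥ (path.toList.length : Int) then ("", start)
  else
    let i := pvBSkip path.toList start
    let slash := PySem.Chars.findFrom path.toList ['/'] i
    let e := if slash = -1 then (path.toList.length : Int) else slash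
    (PySem.Str.strip (String.mk (PySem.List.slice path.toList (some i) (some e))), e)

-- ===== PRECONDITION & SPEC =====
-- Pre_ restricts to the natural domain of a path cursor, 0 ≤ start: for negative start A raises
-- IndexError when start < -len(path), and otherwise both programs return values produced by Python's
-- negative-index handling in two different ways, neither of which anyone would specify for a cursor.
def Pre_get_next_directory_py (path : String) (start : Int) : Prop := 0 ≤ start
instance (path : String) (start : Int) : Decidable (Pre_get_next_directory_py path start) := by unfold Pre_get_next_directory_py; infer_instance

def pvWitness_get_next_directory_py : String × Int := ("/ab/c", 0)

def Spec_get_next_directory_py (path : String) (start : Int) (out : String × Int) : Prop := out = get_next_directory_py_alt path start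
instance (path : String) (start : Int) (out : String × Int) : Decidable (Spec_get_next_directory_py path start out) := by unfold Spec_get_next_directory_py; infer_instance

-- ===== CLAIM (what is proved, stated in full; the proofs are below) =====
def Claim_equal_get_next_directory_py : Prop := ∀ (path : String) (start : Int), Dom_get_next_directory_py path start → Pre_get_next_directory_py path start → Spec_get_next_directory_py path start (get_next_directory_py path start)

-- ===== LEMMAS AND PROOFS =====

-- [a] is a prefix exactly of lists starting with a
theorem pv_singleton_prefix (a : Char) (l : List Char) : [a] <+: l ↔ l.head? = some a := by
  cases l <;> simp [List.cons_prefix_cons, eq_comm]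

-- the length of takeWhile (· ≠ '/') is the index of the first '/'
theorem pv_takeWhile_len (d : List Char) (k : Nat) (hk : d[k]? = some '/')
    (hmin : ∀ i, i < k → d[i]? ≠ some '/') :
    ((d.takeWhile (fun c => c ≠ '/')).length) = k := by
  induction d generalizing k with
  | nil => simp at hk
  | cons c t ih =>
    cases k with
    | zero => simp at hk; simp [hk]
    | succ k =>
      have hc : c ≠ '/' := by
        have := hmin 0 (Nat.succ_pos k)
        simpa using this
      rw [List.takeWhile_cons_of_pos (by simp [hc])]
      simp only [List.length_cons]
      have := ih k (by simpa using hk) (fun i hi => by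
        have := hmin (i + 1) (by omega)
        simpa using this)
      omega

-- the skip phases agree: A's loop with empty res reaches exactly bSkip's stop index
theorem pv_skip (cs : List Char) (s : Nat) (hs : s ≤ cs.length) :
    ∃ j : Nat, pvBSkip cs (s : Int) = (j : Int) ∧ s ≤ j ∧ j ≤ cs.length ∧
      (∀ c, cs[j]? = some c → c ≠ '/') ∧
      pvALoop cs [] (s : Int) = pvALoop cs [] (j : Int) := by
  by_cases h : s < cs.length
  · have hget : PySem.List.pyGet? cs ((s : Nat) : Int) = some cs[s] := by
      simp [pysem, h]
    by_cases hc : cs[s] = '/'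
    · obtain ⟨j, h1, h2, h3, h4, h5⟩ := pv_skip cs (s + 1) h
      refine ⟨j, ?_, by omega, h3, h4, ?_⟩
      · rw [pvBSkip]
        have hlt : ((s : Nat) : Int) < (cs.length : Int) := by exact_mod_cast h
        rw [dif_pos hlt, hget]
        simp only []
        rw [if_pos hc]
        rw [show ((s : Nat) : Int) + 1 = ((s + 1 : Nat) : Int) by push_cast; ring]
        exact h1
      · rw [pvALoop]
        have hlt : ((s : Nat) : Int) < (cs.length : Int) := by exact_mod_cast h
        rw [dif_pos hlt, hget]
        simp only []
        rw [if_neg (not_not_intro hc), if_neg (by simp : ¬(([] : List Char) ≠ []))]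
        rw [show ((s : Nat) : Int) + 1 = ((s + 1 : Nat) : Int) by push_cast; ring]
        exact h5
    · refine ⟨s, ?_, le_refl s, le_of_lt h, ?_, rfl⟩
      · rw [pvBSkip]
        have hlt : ((s : Nat) : Int) < (cs.length : Int) := by exact_mod_cast h
        rw [dif_pos hlt, hget]
        simp only []
        rw [if_neg hc]
      · intro c hc' h'
        rw [List.getElem?_eq_getElem h] at hc'
        exact hc ((Option.some_injective _ hc').trans h')
  · have hj : s = cs.length := le_antisymm hs (Nat.le_of_not_lt h)
    refine ⟨s, ?_, le_refl s, le_of_eq hj, ?_, rfl⟩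
    · rw [pvBSkip, dif_neg (by exact_mod_cast h)]
    · intro c hc'
      rw [List.getElem?_eq_none_iff.mpr (le_of_eq hj.symm)] at hc'
      exact absurd hc' (by simp)
termination_by cs.length - s
decreasing_by omega

-- the collect phase: once res is nonempty (or the cursor is not on a '/'), A's loop
-- appends exactly the slash-free run starting at the cursor and stops right after it
theorem pv_collect (cs : List Char) (j : Nat) (res : List Char)
    (hres : res = [] → ∀ c, cs[j]? = some c → c ≠ '/') :
    pvALoop cs res (j : Int) =
      (res ++ (cs.drop j).takeWhile (fun c => c ≠ '/'),
       (j : Int) + (((cs.drop j).takeWhile (fun c => c ≠ '/')).length : Int)) := by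
  by_cases h : j < cs.length
  · have hget : PySem.List.pyGet? cs ((j : Nat) : Int) = some cs[j] := by
      simp [pysem, h]
    have hdrop : cs.drop j = cs[j] :: cs.drop (j + 1) := List.drop_eq_getElem_cons h
    have hlt : ((j : Nat) : Int) < (cs.length : Int) := by exact_mod_cast h
    by_cases hc : cs[j] = '/'
    · have hresne : res ≠ [] := by
        intro hnil
        exact hres hnil cs[j] (List.getElem?_eq_getElem h) hc
      rw [pvALoop, dif_pos hlt, hget]
      simp only []
      rw [if_neg (not_not_intro hc), if_pos hresne]
      rw [hdrop, List.takeWhile_cons_of_neg (by simp [hc])]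
      simp
    · rw [pvALoop, dif_pos hlt, hget]
      simp only []
      rw [if_pos hc]
      rw [show ((j : Nat) : Int) + 1 = ((j + 1 : Nat) : Int) by push_cast; ring]
      rw [pv_collect cs (j + 1) (res ++ [cs[j]]) (by simp)]
      rw [hdrop, List.takeWhile_cons_of_pos (by simp [hc])]
      rw [Prod.mk.injEq]
      constructor
      · simp [List.append_assoc]
      · simp only [List.length_cons]
        push_cast
        ring
  · have hdrop : cs.drop j = [] := List.drop_eq_nil_of_le (Nat.le_of_not_lt h)
    rw [pvALoop, dif_neg (by exact_mod_cast h)]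
    simp [hdrop]
termination_by cs.length - j
decreasing_by omega

-- B's find-based end index equals the cursor plus the slash-free run length
theorem pv_find (cs : List Char) (j : Nat) (hj : j ≤ cs.length) :
    (if PySem.Chars.findFrom cs ['/'] (j : Int) = -1 then (cs.length : Int)
     else PySem.Chars.findFrom cs ['/'] (j : Int))
    = (j : Int) + (((cs.drop j).takeWhile (fun c => c ≠ '/')).length : Int) := by
  rw [PySem.Chars.findFrom_natCast cs ['/'] j hj]
  set d := cs.drop j with hd
  by_cases hf : PySem.Chars.find d ['/'] = -1
  · have h1 : (if PySem.Chars.find d ['/'] = -1 then (-1 : Int) else (j : Int) + PySem.Chars.find d ['/']) = -1 := if_pos hf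
    rw [h1, if_pos rfl]
    have hmem : '/' ∉ d := by
      have := (PySem.Chars.find_eq_neg_one_iff d ['/']).mp hf
      intro hm
      exact this ((List.singleton_infix_iff '/' d).mpr hm)
    have htw : d.takeWhile (fun c => c ≠ '/') = d := by
      rw [List.takeWhile_eq_self_iff]
      intro x hx
      simp only [decide_eq_true_eq]
      intro hxe
      exact hmem (hxe ▸ hx)
    rw [htw]
    have : d.length = cs.length - j := by rw [hd, List.length_drop]
    omega
  · have hpos : 0 ≤ PySem.Chars.find d ['/'] := by
      have := PySem.Chars.neg_one_le_find d ['/']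
      omega
    have h1 : (if PySem.Chars.find d ['/'] = -1 then (-1 : Int) else (j : Int) + PySem.Chars.find d ['/']) = (j : Int) + PySem.Chars.find d ['/'] := if_neg hf
    rw [h1, if_neg (by omega)]
    obtain ⟨hpre, hmin⟩ := PySem.Chars.find_spec hpos
    have hk : d[(PySem.Chars.find d ['/']).toNat]? = some '/' := by
      have := (pv_singleton_prefix '/' (d.drop (PySem.Chars.find d ['/']).toNat)).mp hpre
      rwa [List.head?_drop] at this
    have hmin' : ∀ i, i < (PySem.Chars.find d ['/']).toNat → d[i]? ≠ some '/' := by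
      intro i hi hsome
      exact hmin i hi ((pv_singleton_prefix '/' (d.drop i)).mpr (by rwa [List.head?_drop]))
    have := pv_takeWhile_len d (PySem.Chars.find d ['/']).toNat hk hmin'
    omega

-- ===== VERDICT (by name: the statement is the Claim_ definition above) =====
theorem get_next_directory_py_spec : Claim_equal_get_next_directory_py := by
  intro path start _hdom hpre
  unfold Spec_get_next_directory_py
  unfold Pre_get_next_directory_py at hpre
  by_cases hge : start ≥ (path.toList.length : Int)
  · simp only [get_next_directory_py, get_next_directory_py_alt]
    rw [pvALoop, dif_neg (by omega), if_pos hge]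
    simp only [Prod.mk.injEq]
    exact ⟨by decide, trivial⟩
  · obtain ⟨s, hs⟩ : ∃ s : Nat, start = (s : Int) := ⟨start.toNat, (Int.toNat_of_nonneg hpre).symm⟩
    subst hs
    have hslen : s ≤ path.toList.length := by omega
    obtain ⟨j, hbs, hsj, hjn, hjc, haeq⟩ := pv_skip path.toList s hslen
    simp only [get_next_directory_py, get_next_directory_py_alt]
    rw [if_neg hge]
    rw [hbs, pv_find path.toList j hjn]
    have hA := pv_collect path.toList j [] (fun _ => hjc)
    rw [haeq, hA]
    set t := (path.toList.drop j).takeWhile (fun c => c ≠ '/') with ht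
    rw [PySem.List.slice_natCast_add path.toList j t.length]
    have hslice : (path.toList.drop j).take t.length = t := by
      rw [ht]
      exact (List.prefix_iff_eq_take.mp (List.takeWhile_prefix _)).symm
    rw [hslice]
    simp
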